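-- pv_equiv track=rewrite | github.com/JulienDavat/sage-agg-experiments | client/formatters.py | binding_to_json
-- ===== SOURCE A (Python) =====
-- def get_binding_type(value):
--     # literal case
--     if value.startswith("\""):
--         extra_label, extra_value = None, None
--         if "\"^^<http" in value:
--             index = value.rfind("\"^^<http")
--             extra_label, extra_value = "datatype", value[index + 4:len(value) - 1]
--             value = value[0:index + 1]
--         elif "\"^^http" in value:
--             index = value.rfind("\"^^http")
--             extra_label, extra_value = "datatype", value[index + 3:]
--             value = value[0:index + 1]
--         elif "\"@" in value:
--             index = value.rfind("\"@")
--             extra_label, extra_value = "xml:lang", value[index + 2:]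
--             value = value[0:index + 1]
--         return value[1:len(value) - 1], "literal", extra_label, extra_value
--     else:
--         # as the dataset is blank-node free, all other values are uris
--         return value, "uri", None, None
--
-- def binding_to_json(binding):
--     """Format a set of solutions bindings in the W3C SPARQL JSON format"""
--     json_binding = dict()
--     for variable, value in binding.items():
--         variable = variable[1:]
--         json_binding[variable] = dict()
--         value, type, extra_label, extra_value = get_binding_type(value.strip())
--         json_binding[variable]["value"] = value
--         json_binding[variable]["type"] = type
--         if extra_label is not None:
--             json_binding[variable][extra_label] = extra_value
--     return json_binding
-- ===== SOURCE B (Python) =====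
-- # Single right-to-left character scan: one backward pass per value finds the
-- # positions of all three literal markers at once (early exit on the top-priority
-- # one), replacing A's three independent substring searches (objective: alternative).
--
-- def _classify(v):
--     if not v.startswith('"'):
--         return {"value": v, "type": "uri"}
--     dt = lang = None
--     i = len(v) - 1
--     while i >= 0:
--         if v[i] == '"':
--             rest = v[i + 1:]
--             if rest.startswith('^^<http'):
--                 # highest priority; first hit going backward = last occurrence
--                 return {"value": v[1:i], "type": "literal", "datatype": v[i + 4:-1]}
--             if dt is None and rest.startswith('^^http'):
--                 dt = i
--             if lang is None and rest.startswith('@'):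
--                 lang = i
--         i -= 1
--     if dt is not None:
--         return {"value": v[1:dt], "type": "literal", "datatype": v[dt + 3:]}
--     if lang is not None:
--         return {"value": v[1:lang], "type": "literal", "xml:lang": v[lang + 2:]}
--     return {"value": v[1:-1], "type": "literal"}
--
--
-- def binding_to_json(binding):
--     """Format a set of solutions bindings in the W3C SPARQL JSON format"""
--     return {variable[1:]: _classify(value.strip()) for variable, value in binding.items()}
-- ===== Notes on version B (the rewrite author's own statement) =====
-- stated objective: alternative
-- what changed: Replaces A's three independent substring searches (rfind + membership, tried in an if/elif chain) by a single right-to-left character scan that locates all three literal markers in one backward pass, returning early on the top-priority one; the outer loop becomes a dict comprehension over one-shot entry dicts instead of A's repeated nested-dict mutation.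
import Mathlib
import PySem

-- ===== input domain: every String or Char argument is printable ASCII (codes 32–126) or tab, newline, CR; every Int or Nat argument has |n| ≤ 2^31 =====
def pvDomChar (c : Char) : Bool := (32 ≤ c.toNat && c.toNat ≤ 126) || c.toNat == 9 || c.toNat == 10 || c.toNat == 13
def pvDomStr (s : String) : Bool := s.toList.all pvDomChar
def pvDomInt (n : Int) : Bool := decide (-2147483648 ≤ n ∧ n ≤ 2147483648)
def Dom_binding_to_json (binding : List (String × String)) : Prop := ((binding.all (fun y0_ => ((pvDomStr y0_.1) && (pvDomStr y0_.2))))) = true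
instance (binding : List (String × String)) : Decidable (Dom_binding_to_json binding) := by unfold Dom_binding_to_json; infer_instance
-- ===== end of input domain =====

set_option maxHeartbeats 1000000


-- B replaces A's three independent substring searches (rfind/membership in an if/elif
-- chain) by a single right-to-left character scan that finds all three marker positions
-- in one backward pass with early exit, and builds each entry dict in one shot
-- (objective: alternative).

-- ===== PORT A =====
-- get_binding_type: extra_label/extra_value are always assigned together in A,
-- so the pair is ported as one Option (String × String).
def get_binding_type (value : String) : String × String × Option (String × String) :=
  if PySem.Str.startswith value "\"" then
    let st :=
      if PySem.Str.isIn "\"^^<http" value then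
        let index := PySem.Str.rfind value "\"^^<http"
        (PySem.Str.slice value (some 0) (some (index + 1)),
         some ("datatype", PySem.Str.slice value (some (index + 4)) (some ((PySem.Str.len value : Int) - 1))))
      else if PySem.Str.isIn "\"^^http" value then
        let index := PySem.Str.rfind value "\"^^http"
        (PySem.Str.slice value (some 0) (some (index + 1)),
         some ("datatype", PySem.Str.slice value (some (index + 3)) none))
      else if PySem.Str.isIn "\"@" value then
        let index := PySem.Str.rfind value "\"@"
        (PySem.Str.slice value (some 0) (some (index + 1)),
         some ("xml:lang", PySem.Str.slice value (some (index + 2)) none))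
      else (value, none)
    (PySem.Str.slice st.1 (some 1) (some ((PySem.Str.len st.1 : Int) - 1)), "literal", st.2)
  else (value, "uri", none)

def binding_to_json (binding : List (String × String)) : List (String × List (String × String)) :=
  let json := binding.foldl (fun (json : PySem.Dict String (PySem.Dict String String)) vb =>
    let variable_ := PySem.Str.slice vb.1 (some 1) none
    let json := json.insert variable_ (PySem.Dict.mk [])
    let r := get_binding_type (PySem.Str.strip vb.2)
    let json := json.modify variable_ (PySem.Dict.mk []) (fun inner => inner.insert "value" r.1)
    let json := json.modify variable_ (PySem.Dict.mk []) (fun inner => inner.insert "type" r.2.1)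
    match r.2.2 with
    | some lv => json.modify variable_ (PySem.Dict.mk []) (fun inner => inner.insert lv.1 lv.2)
    | none => json) (PySem.Dict.mk [])
  json.items.map (fun p => (p.1, p.2.items))

-- ===== PORT B =====
-- the code after Source B's while loop (dt/lang fallthrough); dict literals become
-- assoc-list literals (their keys are distinct)
def pvFinish (cv : List Char) (dt lang : Option Nat) : List (String × String) :=
  match dt with
  | some d =>
      [("value", String.ofList (PySem.Chars.slice cv (some 1) (some (d : Int)))),
       ("type", "literal"),
       ("datatype", String.ofList (PySem.Chars.slice cv (some ((d : Int) + 3)) none))]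
  | none =>
    match lang with
    | some l =>
        [("value", String.ofList (PySem.Chars.slice cv (some 1) (some (l : Int)))),
         ("type", "literal"),
         ("xml:lang", String.ofList (PySem.Chars.slice cv (some ((l : Int) + 2)) none))]
    | none =>
        [("value", String.ofList (PySem.Chars.slice cv (some 1) (some (-1)))),
         ("type", "literal")]

-- hand port of Source B's `while i >= 0` backward scan, exact: the Nat argument is i+1
-- (so `n+1` handles index i = n and `0` is loop exit); v[i] is cv[n]?,
-- rest = v[i+1:] is cv.drop (n+1), rest.startswith(t) is t.isPrefixOf rest
def pvScan (cv : List Char) : Nat → Option Nat → Option Nat → List (String × String)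
  | 0, dt, lang => pvFinish cv dt lang
  | n + 1, dt, lang =>
    if cv[n]? = some '"' then
      let rest := cv.drop (n + 1)
      if List.isPrefixOf ['^', '^', '<', 'h', 't', 't', 'p'] rest then
        [("value", String.ofList (PySem.Chars.slice cv (some 1) (some (n : Int)))),
         ("type", "literal"),
         ("datatype", String.ofList (PySem.Chars.slice cv (some ((n : Int) + 4)) (some (-1))))]
      else
        pvScan cv n
          (if dt.isNone && List.isPrefixOf ['^', '^', 'h', 't', 't', 'p'] rest then some n else dt)
          (if lang.isNone && List.isPrefixOf ['@'] rest then some n else lang)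
    else pvScan cv n dt lang

-- _classify: the scan starts at i = len(v) - 1
def pvClassify (v : String) : List (String × String) :=
  if !(PySem.Str.startswith v "\"") then [("value", v), ("type", "uri")]
  else pvScan v.toList v.toList.length none none

def binding_to_json_alt (binding : List (String × String)) : List (String × List (String × String)) :=
  (PySem.Dict.ofList (binding.map (fun p =>
    (PySem.Str.slice p.1 (some 1) none, pvClassify (PySem.Str.strip p.2))))).items

-- ===== PRECONDITION & SPEC =====
def Spec_binding_to_json (binding : List (String × String)) (out : List (String × List (String × String))) : Prop := out = binding_to_json_alt binding
instance (binding : List (String × String)) (out : List (String × List (String × String))) : Decidable (Spec_binding_to_json binding out) := by unfold Spec_binding_to_json; infer_instance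

-- ===== CLAIM (what is proved, stated in full; the proofs are below) =====
def Claim_equal_binding_to_json : Prop := ∀ (binding : List (String × String)), Dom_binding_to_json binding → Spec_binding_to_json binding (binding_to_json binding)

-- ===== LEMMAS AND PROOFS =====

-- an occurrence of marker m at index i
def pvOcc (m cv : List Char) (i : Nat) : Bool := m.isPrefixOf (cv.drop i)

-- greatest i < n with P i (the first index the backward scan hits)
def pvLastOcc (P : Nat → Bool) : Nat → Option Nat
  | 0 => none
  | n + 1 => if P n then some n else pvLastOcc P n

lemma pvLastOcc_eq_none_iff (P : Nat → Bool) (n : Nat) :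
    pvLastOcc P n = none ↔ ∀ i < n, P i = false := by
  induction n with
  | zero => simp [pvLastOcc]
  | succ n ih =>
      by_cases h : P n = true
      · simp only [pvLastOcc, h, if_true]
        constructor
        · intro hc; exact absurd hc (by simp)
        · intro hall; exact absurd (hall n (by omega)) (by simp [h])
      · have h' : P n = false := by simpa using h
        simp only [pvLastOcc, h', if_false, Bool.false_eq_true, ih]
        constructor
        · intro hall i hi
          rcases Nat.lt_or_ge i n with hlt | hge
          · exact hall i hlt
          · have : i = n := by omega
            subst this; exact h'
        · intro hall i hi; exact hall i (by omega)

lemma pvLastOcc_some (P : Nat → Bool) (n k : Nat) (h : pvLastOcc P n = some k) :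
    P k = true ∧ k < n := by
  induction n with
  | zero => simp [pvLastOcc] at h
  | succ n ih =>
      by_cases hp : P n = true
      · simp only [pvLastOcc, hp, if_true, Option.some.injEq] at h
        subst h; exact ⟨hp, by omega⟩
      · simp only [pvLastOcc, hp] at h
        obtain ⟨h1, h2⟩ := ih h
        exact ⟨h1, by omega⟩

lemma pvLastOcc_ne_none (P : Nat → Bool) (n j : Nat) (hj : j < n) (hp : P j = true) :
    pvLastOcc P n ≠ none := by
  intro hc
  rw [pvLastOcc_eq_none_iff] at hc
  have := hc j hj
  simp [hp] at this

-- scan-step condition ↔ occurrence of '"'::t at n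
lemma pv_step_occ (cv : List Char) (n : Nat) (t : List Char) :
    (cv[n]? = some '"' ∧ t.isPrefixOf (cv.drop (n + 1)) = true)
      ↔ pvOcc ('"' :: t) cv n = true := by
  unfold pvOcc
  by_cases h : n < cv.length
  · rw [List.drop_eq_getElem_cons h, List.getElem?_eq_getElem h]
    show _ ↔ (('"' == cv[n]) && t.isPrefixOf (cv.drop (n + 1))) = true
    rw [Bool.and_eq_true, beq_iff_eq]
    constructor
    · rintro ⟨h1, h2⟩
      exact ⟨(Option.some_inj.mp h1).symm, h2⟩
    · rintro ⟨h1, h2⟩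
      exact ⟨by rw [h1], h2⟩
  · have hd : cv.drop n = [] := List.drop_eq_nil_of_le (by omega)
    have hg : cv[n]? = none := List.getElem?_eq_none (by omega)
    rw [hd, hg]
    simp [List.isPrefixOf]

-- an occurrence of a nonempty marker is strictly below the length
lemma pvOcc_lt (m cv : List Char) (i : Nat) (hm : m ≠ []) (h : pvOcc m cv i = true) :
    i < cv.length := by
  unfold pvOcc at h
  obtain ⟨r, hr⟩ := List.isPrefixOf_iff_prefix.mp h
  by_contra hc
  have : cv.drop i = [] := List.drop_eq_nil_of_le (by omega)
  rw [this] at hr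
  cases m with
  | nil => exact hm rfl
  | cons a t => simp at hr

lemma pvOcc_len_le (m cv : List Char) (i : Nat) (hm : m ≠ []) (h : pvOcc m cv i = true) :
    i + m.length ≤ cv.length := by
  have hi := pvOcc_lt m cv i hm h
  unfold pvOcc at h
  obtain ⟨r, hr⟩ := List.isPrefixOf_iff_prefix.mp h
  have := congrArg List.length hr
  simp at this
  omega

lemma pv_or_update (dt r : Option Nat) (b : Bool) (n : Nat) :
    (if dt.isNone && b then some n else dt).or r = dt.or (if b then some n else r) := by
  cases dt <;> cases b <;> simp

-- the backward scan computes the greatest marker-1 occurrence (early exit), else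
-- hands the greatest marker-2 / marker-3 occurrences (unless already set) to pvFinish
lemma pvScan_eq (cv : List Char) (n : Nat) (dt lang : Option Nat) :
    pvScan cv n dt lang =
      match pvLastOcc (pvOcc ['"', '^', '^', '<', 'h', 't', 't', 'p'] cv) n with
      | some i =>
          [("value", String.ofList (PySem.Chars.slice cv (some 1) (some (i : Int)))),
           ("type", "literal"),
           ("datatype", String.ofList (PySem.Chars.slice cv (some ((i : Int) + 4)) (some (-1))))]
      | none =>
          pvFinish cv (dt.or (pvLastOcc (pvOcc ['"', '^', '^', 'h', 't', 't', 'p'] cv) n))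
            (lang.or (pvLastOcc (pvOcc ['"', '@'] cv) n)) := by
  induction n generalizing dt lang with
  | zero => simp [pvScan, pvLastOcc]
  | succ n ih =>
      by_cases hq : cv[n]? = some '"'
      · by_cases h1 : List.isPrefixOf ['^', '^', '<', 'h', 't', 't', 'p'] (cv.drop (n + 1)) = true
        · have hocc1 : pvOcc ['"', '^', '^', '<', 'h', 't', 't', 'p'] cv n = true :=
            (pv_step_occ cv n _).mp ⟨hq, h1⟩
          simp only [pvScan, hq, if_true, h1, pvLastOcc, hocc1]
        · have hocc1 : pvOcc ['"', '^', '^', '<', 'h', 't', 't', 'p'] cv n = false := by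
            by_contra hc
            have := ((pv_step_occ cv n _).mpr (by simpa using hc)).2
            exact h1 this
          have hocc2 : pvOcc ['"', '^', '^', 'h', 't', 't', 'p'] cv n
              = List.isPrefixOf ['^', '^', 'h', 't', 't', 'p'] (cv.drop (n + 1)) := by
            by_cases h2 : List.isPrefixOf ['^', '^', 'h', 't', 't', 'p'] (cv.drop (n + 1)) = true
            · rw [h2, (pv_step_occ cv n _).mp ⟨hq, h2⟩]
            · have h2' := Bool.eq_false_iff.mpr h2
              rw [h2']
              by_contra hc
              exact h2 ((pv_step_occ cv n _).mpr (by simpa using hc)).2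
          have hocc3 : pvOcc ['"', '@'] cv n = List.isPrefixOf ['@'] (cv.drop (n + 1)) := by
            by_cases h3 : List.isPrefixOf ['@'] (cv.drop (n + 1)) = true
            · rw [h3, (pv_step_occ cv n _).mp ⟨hq, h3⟩]
            · have h3' := Bool.eq_false_iff.mpr h3
              rw [h3']
              by_contra hc
              exact h3 ((pv_step_occ cv n _).mpr (by simpa using hc)).2
          simp only [pvScan, hq, if_true, h1, if_false, Bool.false_eq_true]
          rw [ih]
          simp only [pvLastOcc, hocc1, if_false, Bool.false_eq_true, ← hocc2, ← hocc3,
            pv_or_update]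
      · have hocc : ∀ t, pvOcc ('"' :: t) cv n = false := by
          intro t
          by_contra hc
          exact hq ((pv_step_occ cv n t).mpr (by simpa using hc)).1
        simp only [pvScan, hq, if_false]
        rw [ih]
        simp only [pvLastOcc, hocc, if_false, Bool.false_eq_true]

-- rfind.go returns the greatest occurrence index ≤ n, or -1
lemma pv_go_eq_lastOcc (s sub : List Char) (n : Nat) :
    PySem.Chars.rfind.go s sub n =
      match pvLastOcc (pvOcc sub s) (n + 1) with
      | some i => (i : Int)
      | none => -1 := by
  induction n with
  | zero =>
      simp only [PySem.Chars.rfind.go, pvLastOcc, pvOcc, List.drop_zero]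
      split_ifs <;> rfl
  | succ n ih =>
      have hstep : PySem.Chars.rfind.go s sub (n + 1)
          = if sub.isPrefixOf (s.drop (n + 1)) then ((n + 1 : Nat) : Int)
            else PySem.Chars.rfind.go s sub n := by
        simp [PySem.Chars.rfind.go]
      rw [hstep, ih]
      by_cases h : sub.isPrefixOf (s.drop (n + 1)) = true
      · simp only [pvLastOcc, pvOcc, h, if_true]
      · have h' := Bool.eq_false_iff.mpr h
        simp only [pvLastOcc, pvOcc, h', if_false, Bool.false_eq_true]

lemma pv_rfind_eq_lastOcc (s sub : List Char) (hsub : sub ≠ []) :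
    PySem.Chars.rfind s sub =
      match pvLastOcc (pvOcc sub s) s.length with
      | some i => (i : Int)
      | none => -1 := by
  show PySem.Chars.rfind.go s sub s.length = _
  rw [pv_go_eq_lastOcc]
  have hlen : pvOcc sub s s.length = false := by
    unfold pvOcc
    rw [List.drop_length]
    cases sub with
    | nil => exact absurd rfl hsub
    | cons a t => simp [List.isPrefixOf]
  simp only [pvLastOcc, hlen, if_false, Bool.false_eq_true]

lemma pv_isIn_lastOcc (s sub : List Char) (hsub : sub ≠ [])
    (h : PySem.Chars.isIn sub s = true) :
    pvLastOcc (pvOcc sub s) s.length ≠ none := by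
  obtain ⟨j, hj⟩ := (PySem.Chars.exists_prefix_drop_iff_isIn sub s).mpr h
  have hpj : pvOcc sub s j = true := by
    unfold pvOcc; exact List.isPrefixOf_iff_prefix.mpr hj
  exact pvLastOcc_ne_none (pvOcc sub s) s.length j (pvOcc_lt sub s j hsub hpj) hpj

lemma pv_not_isIn_lastOcc (s sub : List Char) (h : PySem.Chars.isIn sub s = false) :
    pvLastOcc (pvOcc sub s) s.length = none := by
  rw [pvLastOcc_eq_none_iff]
  intro i _
  by_contra hc
  have hp : sub <+: s.drop i := List.isPrefixOf_iff_prefix.mp (by simpa [pvOcc] using hc)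
  have := (PySem.Chars.exists_prefix_drop_iff_isIn sub s).mp ⟨i, hp⟩
  rw [h] at this
  exact Bool.false_ne_true this

-- ---- dict-building lemmas (inner dicts have distinct keys) ----

lemma pv_dict_ext {κ ν : Type} (d e : PySem.Dict κ ν) (h : d.items = e.items) : d = e := by
  cases d; cases e; cases h; rfl

lemma pv_contains_false_keys {ν : Type} (d : PySem.Dict String ν) (k : String)
    (h : d.contains k = false) : ∀ p ∈ d.items, (p.1 == k) = false := by
  simp only [PySem.Dict.contains, List.any_eq_false] at h
  intro p hp
  simpa using h p hp

lemma pv_insert_insert_self {ν : Type} (d : PySem.Dict String ν) (k : String) (v w : ν) :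
    (d.insert k v).insert k w = d.insert k w := by
  apply pv_dict_ext
  have hc : (d.insert k v).contains k = true := PySem.Dict.contains_insert_self d k v
  rw [PySem.Dict.items_insert, if_pos hc, PySem.Dict.items_insert, PySem.Dict.items_insert]
  by_cases h : d.contains k = true
  · rw [if_pos h, if_pos h, List.map_map]
    apply List.map_congr_left
    intro p _
    by_cases hp : (p.1 == k) = true <;> simp [hp, Function.comp]
  · rw [if_neg h, if_neg h, List.map_append]
    have hkeys := pv_contains_false_keys d k (by simpa using h)
    have hmap : List.map (fun p => if (p.1 == k) = true then (k, w) else p) d.items = d.items := by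
      conv_rhs => rw [← List.map_id d.items]
      apply List.map_congr_left
      intro p hp
      simp [hkeys p hp]
    rw [hmap]
    simp

lemma pv_getD_insert_self {ν : Type} (d : PySem.Dict String ν) (k : String) (v dflt : ν) :
    (d.insert k v).getD k dflt = v := by
  rw [PySem.Dict.getD_insert]
  simp

-- the inner dict A builds for one binding value
def pvDictA (r : String × String × Option (String × String)) : PySem.Dict String String :=
  match r.2.2 with
  | some lv => (((PySem.Dict.mk []).insert "value" r.1).insert "type" r.2.1).insert lv.1 lv.2
  | none => ((PySem.Dict.mk []).insert "value" r.1).insert "type" r.2.1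

lemma pv_mk_insert {ν : Type} (l : List (String × ν)) (k : String) (v : ν)
    (h : ∀ p ∈ l, p.1 ≠ k) : (PySem.Dict.mk l).insert k v = PySem.Dict.mk (l ++ [(k, v)]) := by
  apply pv_dict_ext
  have hc : (PySem.Dict.mk l).contains k = false := by
    simp only [PySem.Dict.contains, List.any_eq_false]
    intro p hp
    simpa using h p hp
  rw [PySem.Dict.items_insert, if_neg (by simp [hc])]

lemma pv_dictA_some (a t l x : String) (h1 : l ≠ "value") (h2 : l ≠ "type") :
    pvDictA (a, t, some (l, x)) = PySem.Dict.mk [("value", a), ("type", t), (l, x)] := by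
  show (((PySem.Dict.mk []).insert "value" a).insert "type" t).insert l x = _
  rw [pv_mk_insert [] "value" a (by intro p hp; simp at hp),
      pv_mk_insert ([] ++ [("value", a)]) "type" t
        (by intro p hp; simp at hp; subst hp; simp),
      pv_mk_insert (([] ++ [("value", a)]) ++ [("type", t)]) l x
        (by intro p hp; simp at hp
            rcases hp with hp | hp <;> subst hp
            · exact Ne.symm h1
            · exact Ne.symm h2)]
  simp

lemma pv_dictA_none (a t : String) :
    pvDictA (a, t, none) = PySem.Dict.mk [("value", a), ("type", t)] := by
  show ((PySem.Dict.mk []).insert "value" a).insert "type" t = _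
  rw [pv_mk_insert [] "value" a (by intro p hp; simp at hp),
      pv_mk_insert ([] ++ [("value", a)]) "type" t
        (by intro p hp; simp at hp; subst hp; simp)]
  simp

-- ---- slice equalities between A's expressions and B's ----

-- A's inner literal text value[0:k+1] then [1:len'-1]  =  B's v[1:k]
lemma pv_inner_eq (vl : List Char) (k : Nat) (hk : k + 1 ≤ vl.length) :
    PySem.Chars.slice (PySem.Chars.slice vl (some 0) (some ((k : Int) + 1))) (some 1)
        (some (((PySem.Chars.slice vl (some 0) (some ((k : Int) + 1))).length : Int) - 1))
      = PySem.Chars.slice vl (some 1) (some (k : Int)) := by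
  simp only [PySem.Chars.slice_eq_listSlice, PySem.List.slice_zero_start]
  rw [show ((k : Int) + 1) = ((k + 1 : Nat) : Int) by push_cast; ring]
  rw [PySem.List.slice_to_natCast vl (k + 1)]
  have hlen : (vl.take (k + 1)).length = k + 1 := by simp; omega
  rw [hlen]
  rw [show (((k + 1 : Nat) : Int) - 1) = ((k : Nat) : Int) by push_cast; ring]
  rw [show (1 : Int) = ((1 : Nat) : Int) from rfl]
  rw [PySem.List.slice_natCast, PySem.List.slice_natCast]
  rw [List.drop_take, List.take_take]
  congr 1
  omega

-- for nonempty lists, a -1 end bound is a (len-1) end bound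
lemma pv_neg_one_end (vl : List Char) (a : Int) (h : 1 ≤ vl.length) :
    PySem.Chars.slice vl (some a) (some (-1))
      = PySem.Chars.slice vl (some a) (some ((vl.length : Int) - 1)) := by
  simp only [PySem.Chars.slice_eq_listSlice, PySem.List.slice]
  have h1 : PySem.List.clampIdx vl.length (-1) = vl.length - 1 := PySem.List.clampIdx_neg_one _
  have h2 : PySem.List.clampIdx vl.length ((vl.length : Int) - 1) = vl.length - 1 := by
    unfold PySem.List.clampIdx
    split_ifs <;> omega
  rw [h1, h2]

-- fallback: value[1:len(value)-1] equals value[1:-1]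
lemma pv_fallback_eq (vl : List Char) :
    PySem.Chars.slice vl (some 1) (some ((vl.length : Int) - 1))
      = PySem.Chars.slice vl (some 1) (some (-1)) := by
  rcases Nat.eq_zero_or_pos vl.length with h0 | hpos
  · rw [show ((vl.length : Int) - 1) = (-1 : Int) by omega]
  · exact (pv_neg_one_end vl 1 (by omega)).symm

lemma pv_classify_uri (v : String) (hsw : PySem.Str.startswith v "\"" = false) :
    PySem.Dict.mk (pvClassify v) = pvDictA (get_binding_type v) := by
  simp only [pvClassify, get_binding_type, hsw, Bool.not_false, if_true, Bool.false_eq_true,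
    if_false]
  rw [pv_dictA_none]

-- literal values are nonempty
lemma pv_startswith_len (v : String) (hsw : PySem.Str.startswith v "\"" = true) :
    1 ≤ v.toList.length := by
  have h : ("\"" : String).toList <+: v.toList := by
    have := PySem.Str.startswith_eq v "\""
    rw [this] at hsw
    exact (PySem.Chars.startswith_iff v.toList _).mp hsw
  rw [show ("\"" : String).toList = ['"'] from by decide] at h
  obtain ⟨r, hr⟩ := h
  by_contra hc
  have hnil : v.toList = [] := List.eq_nil_of_length_eq_zero (by omega)
  rw [hnil] at hr
  simp at hr

-- main per-value lemma: B's one-pass classifier builds exactly A's inner dict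
lemma pv_classify_eq (v : String) :
    PySem.Dict.mk (pvClassify v) = pvDictA (get_binding_type v) := by
  by_cases hsw : PySem.Str.startswith v "\""
  case neg => exact pv_classify_uri v (by simpa using hsw)
  have hlen1 := pv_startswith_len v hsw
  simp only [pvClassify, hsw, Bool.not_true, Bool.false_eq_true, if_false]
  rw [pvScan_eq]
  by_cases h1 : PySem.Str.isIn "\"^^<http" v = true
  · -- marker 1 wins
    have h1c : PySem.Chars.isIn ("\"^^<http" : String).toList v.toList = true := by
      rw [← PySem.Str.isIn_eq]; exact h1
    have hm : ("\"^^<http" : String).toList = ['"', '^', '^', '<', 'h', 't', 't', 'p'] := by decide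
    rw [hm] at h1c
    rcases hL : pvLastOcc (pvOcc ['"', '^', '^', '<', 'h', 't', 't', 'p'] v.toList) v.toList.length
      with _ | k
    · exact absurd hL (pv_isIn_lastOcc _ _ (by decide) h1c)
    have hrk : PySem.Str.rfind v "\"^^<http" = (k : Int) := by
      rw [PySem.Str.rfind_eq, hm, pv_rfind_eq_lastOcc _ _ (by decide), hL]
    have hkocc := (pvLastOcc_some _ _ _ hL).1
    have hk8 : k + 8 ≤ v.toList.length := by
      have := pvOcc_len_le _ _ _ (by decide) hkocc
      simpa using this
    dsimp only
    simp only [get_binding_type, hsw, if_true, h1, hrk]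
    rw [pv_dictA_some _ _ _ _ (by decide) (by decide)]
    have e1 : String.ofList (PySem.Chars.slice v.toList (some 1) (some (k : Int)))
        = PySem.Str.slice (PySem.Str.slice v (some 0) (some ((k : Int) + 1))) (some 1)
            (some ((PySem.Str.len (PySem.Str.slice v (some 0) (some ((k : Int) + 1))) : Int) - 1)) := by
      apply String.toList_inj.mp
      simp only [PySem.Str.toList_slice, PySem.Str.len_eq, String.toList_ofList]
      exact (pv_inner_eq v.toList k (by omega)).symm
    have e2 : String.ofList (PySem.Chars.slice v.toList (some ((k : Int) + 4)) (some (-1)))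
        = PySem.Str.slice v (some ((k : Int) + 4)) (some ((PySem.Str.len v : Int) - 1)) := by
      apply String.toList_inj.mp
      simp only [PySem.Str.toList_slice, PySem.Str.len_eq, String.toList_ofList]
      exact pv_neg_one_end v.toList ((k : Int) + 4) hlen1
    rw [e1, e2]
  · -- no marker 1 occurrence
    have h1' : PySem.Str.isIn "\"^^<http" v = false := by simpa using h1
    have h1c : PySem.Chars.isIn ['"', '^', '^', '<', 'h', 't', 't', 'p'] v.toList = false := by
      have := PySem.Str.isIn_eq "\"^^<http" v
      rw [show ("\"^^<http" : String).toList = ['"', '^', '^', '<', 'h', 't', 't', 'p'] by decide]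
        at this
      rw [← this]; exact h1'
    rw [pv_not_isIn_lastOcc _ _ h1c]
    by_cases h2 : PySem.Str.isIn "\"^^http" v = true
    · -- marker 2 wins
      have hm : ("\"^^http" : String).toList = ['"', '^', '^', 'h', 't', 't', 'p'] := by decide
      have h2c : PySem.Chars.isIn ['"', '^', '^', 'h', 't', 't', 'p'] v.toList = true := by
        have := PySem.Str.isIn_eq "\"^^http" v
        rw [hm] at this
        rw [← this]; exact h2
      rcases hL : pvLastOcc (pvOcc ['"', '^', '^', 'h', 't', 't', 'p'] v.toList) v.toList.length
        with _ | k
      · exact absurd hL (pv_isIn_lastOcc _ _ (by decide) h2c)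
      have hrk : PySem.Str.rfind v "\"^^http" = (k : Int) := by
        rw [PySem.Str.rfind_eq, hm, pv_rfind_eq_lastOcc _ _ (by decide), hL]
      have hkocc := (pvLastOcc_some _ _ _ hL).1
      have hk7 : k + 7 ≤ v.toList.length := by
        have := pvOcc_len_le _ _ _ (by decide) hkocc
        simpa using this
      dsimp only
      simp only [get_binding_type, hsw, if_true, h1', Bool.false_eq_true, if_false, h2, hrk,
        Option.none_or, pvFinish]
      rw [pv_dictA_some _ _ _ _ (by decide) (by decide)]
      have e1 : String.ofList (PySem.Chars.slice v.toList (some 1) (some (k : Int)))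
          = PySem.Str.slice (PySem.Str.slice v (some 0) (some ((k : Int) + 1))) (some 1)
              (some ((PySem.Str.len (PySem.Str.slice v (some 0) (some ((k : Int) + 1))) : Int) - 1)) := by
        apply String.toList_inj.mp
        simp only [PySem.Str.toList_slice, PySem.Str.len_eq, String.toList_ofList]
        exact (pv_inner_eq v.toList k (by omega)).symm
      have e2 : String.ofList (PySem.Chars.slice v.toList (some ((k : Int) + 3)) none)
          = PySem.Str.slice v (some ((k : Int) + 3)) none := by
        apply String.toList_inj.mp
        simp only [PySem.Str.toList_slice, String.toList_ofList]
      rw [e1, e2]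
    · have h2' : PySem.Str.isIn "\"^^http" v = false := by simpa using h2
      have h2c : PySem.Chars.isIn ['"', '^', '^', 'h', 't', 't', 'p'] v.toList = false := by
        have := PySem.Str.isIn_eq "\"^^http" v
        rw [show ("\"^^http" : String).toList = ['"', '^', '^', 'h', 't', 't', 'p'] by decide]
          at this
        rw [← this]; exact h2'
      rw [pv_not_isIn_lastOcc _ _ h2c]
      by_cases h3 : PySem.Str.isIn "\"@" v = true
      · -- marker 3 wins
        have hm : ("\"@" : String).toList = ['"', '@'] := by decide
        have h3c : PySem.Chars.isIn ['"', '@'] v.toList = true := by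
          have := PySem.Str.isIn_eq "\"@" v
          rw [hm] at this
          rw [← this]; exact h3
        rcases hL : pvLastOcc (pvOcc ['"', '@'] v.toList) v.toList.length with _ | k
        · exact absurd hL (pv_isIn_lastOcc _ _ (by decide) h3c)
        have hrk : PySem.Str.rfind v "\"@" = (k : Int) := by
          rw [PySem.Str.rfind_eq, hm, pv_rfind_eq_lastOcc _ _ (by decide), hL]
        have hkocc := (pvLastOcc_some _ _ _ hL).1
        have hk2 : k + 2 ≤ v.toList.length := by
          have := pvOcc_len_le _ _ _ (by decide) hkocc
          simpa using this
        dsimp only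
        simp only [get_binding_type, hsw, if_true, h1', h2', Bool.false_eq_true, if_false, h3,
          hrk, Option.none_or, pvFinish]
        rw [pv_dictA_some _ _ _ _ (by decide) (by decide)]
        have e1 : String.ofList (PySem.Chars.slice v.toList (some 1) (some (k : Int)))
            = PySem.Str.slice (PySem.Str.slice v (some 0) (some ((k : Int) + 1))) (some 1)
                (some ((PySem.Str.len (PySem.Str.slice v (some 0) (some ((k : Int) + 1))) : Int) - 1)) := by
          apply String.toList_inj.mp
          simp only [PySem.Str.toList_slice, PySem.Str.len_eq, String.toList_ofList]
          exact (pv_inner_eq v.toList k (by omega)).symm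
        have e2 : String.ofList (PySem.Chars.slice v.toList (some ((k : Int) + 2)) none)
            = PySem.Str.slice v (some ((k : Int) + 2)) none := by
          apply String.toList_inj.mp
          simp only [PySem.Str.toList_slice, String.toList_ofList]
        rw [e1, e2]
      · -- plain literal
        have h3' : PySem.Str.isIn "\"@" v = false := by simpa using h3
        have h3c : PySem.Chars.isIn ['"', '@'] v.toList = false := by
          have := PySem.Str.isIn_eq "\"@" v
          rw [show ("\"@" : String).toList = ['"', '@'] by decide] at this
          rw [← this]; exact h3'
        rw [pv_not_isIn_lastOcc _ _ h3c]
        dsimp only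
        simp only [get_binding_type, hsw, if_true, h1', h2', h3', Bool.false_eq_true, if_false,
          Option.none_or, pvFinish]
        rw [pv_dictA_none]
        have e1 : String.ofList (PySem.Chars.slice v.toList (some 1) (some (-1)))
            = PySem.Str.slice v (some 1) (some ((PySem.Str.len v : Int) - 1)) := by
          apply String.toList_inj.mp
          simp only [PySem.Str.toList_slice, PySem.Str.len_eq, String.toList_ofList]
          exact (pv_fallback_eq v.toList).symm
        rw [e1]

-- ---- outer loop: A's nested-dict mutation vs B's mapped insertions ----

lemma pv_step_eq (json : PySem.Dict String (PySem.Dict String String)) (vb : String × String) :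
    (let variable_ := PySem.Str.slice vb.1 (some 1) none
     let json := json.insert variable_ (PySem.Dict.mk [])
     let r := get_binding_type (PySem.Str.strip vb.2)
     let json := json.modify variable_ (PySem.Dict.mk []) (fun inner => inner.insert "value" r.1)
     let json := json.modify variable_ (PySem.Dict.mk []) (fun inner => inner.insert "type" r.2.1)
     match r.2.2 with
     | some lv => json.modify variable_ (PySem.Dict.mk []) (fun inner => inner.insert lv.1 lv.2)
     | none => json)
    = json.insert (PySem.Str.slice vb.1 (some 1) none)
        (PySem.Dict.mk (pvClassify (PySem.Str.strip vb.2))) := by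
  dsimp only
  simp only [PySem.Dict.modify, pv_getD_insert_self, pv_insert_insert_self]
  rw [pv_classify_eq]
  cases hr : (get_binding_type (PySem.Str.strip vb.2)).2.2 with
  | none => simp only [pvDictA, hr]
  | some lv =>
      simp only [pvDictA, hr]

lemma pv_mapV_insert (d : PySem.Dict String (PySem.Dict String String)) (k : String)
    (v : PySem.Dict String String) :
    PySem.Dict.mk (((d.insert k v).items).map (fun p => (p.1, p.2.items)))
      = (PySem.Dict.mk (d.items.map (fun p => (p.1, p.2.items)))).insert k v.items := by
  apply pv_dict_ext
  have hcon : (PySem.Dict.mk (d.items.map (fun p => (p.1, p.2.items)))).contains k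
      = d.contains k := by
    simp only [PySem.Dict.contains, List.any_map]
    rfl
  by_cases h : d.contains k = true
  · have h2 : (PySem.Dict.mk (d.items.map (fun p => (p.1, p.2.items)))).contains k = true := by
      rw [hcon]; exact h
    rw [PySem.Dict.items_insert, if_pos h, PySem.Dict.items_insert, if_pos h2]
    simp only [List.map_map]
    apply List.map_congr_left
    intro p _
    by_cases hp : (p.1 == k) = true <;> simp [hp, Function.comp]
  · have h2 : ¬ (PySem.Dict.mk (d.items.map (fun p => (p.1, p.2.items)))).contains k = true := by
      rw [hcon]; exact h
    rw [PySem.Dict.items_insert, if_neg h, PySem.Dict.items_insert, if_neg h2]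
    simp

lemma pv_fold_eq (l : List (String × String)) (d : PySem.Dict String (PySem.Dict String String)) :
    PySem.Dict.mk ((l.foldl (fun json vb =>
        json.insert (PySem.Str.slice vb.1 (some 1) none)
          (PySem.Dict.mk (pvClassify (PySem.Str.strip vb.2)))) d).items.map
            (fun p => (p.1, p.2.items)))
    = (l.map (fun p => (PySem.Str.slice p.1 (some 1) none, pvClassify (PySem.Str.strip p.2)))).foldl
        (fun d' p => d'.insert p.1 p.2)
        (PySem.Dict.mk (d.items.map (fun p => (p.1, p.2.items)))) := by
  induction l generalizing d with
  | nil => rfl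
  | cons hd tl ih =>
      simp only [List.foldl_cons, List.map_cons]
      rw [ih, pv_mapV_insert]

-- ===== VERDICT (by name: the statement is the Claim_ definition above) =====
theorem binding_to_json_spec : Claim_equal_binding_to_json := by
  intro binding _
  unfold Spec_binding_to_json
  show binding_to_json binding = binding_to_json_alt binding
  unfold binding_to_json binding_to_json_alt
  have hstep : (fun (json : PySem.Dict String (PySem.Dict String String)) (vb : String × String) =>
      let variable_ := PySem.Str.slice vb.1 (some 1) none
      let json := json.insert variable_ (PySem.Dict.mk [])
      let r := get_binding_type (PySem.Str.strip vb.2)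
      let json := json.modify variable_ (PySem.Dict.mk []) (fun inner => inner.insert "value" r.1)
      let json := json.modify variable_ (PySem.Dict.mk []) (fun inner => inner.insert "type" r.2.1)
      match r.2.2 with
      | some lv => json.modify variable_ (PySem.Dict.mk []) (fun inner => inner.insert lv.1 lv.2)
      | none => json)
    = (fun (json : PySem.Dict String (PySem.Dict String String)) (vb : String × String) =>
        json.insert (PySem.Str.slice vb.1 (some 1) none)
          (PySem.Dict.mk (pvClassify (PySem.Str.strip vb.2)))) := by
    funext json vb
    exact pv_step_eq json vb
  rw [hstep]
  have h := congrArg PySem.Dict.items (pv_fold_eq binding (PySem.Dict.mk []))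
  dsimp only at h ⊢
  rw [h]
  simp [PySem.Dict.ofList, PySem.Dict.update, PySem.Dict.empty, List.foldl_map]
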